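-- pv_equiv track=rewrite | github.com/Tsukumo3/Atcoder | ABC/129/C-typical2.py | starsFib
-- ===== SOURCE A (Python) =====
-- memo = {}
--
-- def starsFib(n,a):
--     if n == 1:
--         return 1
--     elif n == 2:
--         return 2
--
--     elif n in a:
--         return 0
--     else:
--         fib = (starsFib(n-1,a) + starsFib(n-2,a))% 1000000007
--         memo[n] = fib
--         return memo[n]
-- ===== SOURCE B (Python) =====
-- def starsFib(n, a):
--     if n == 1:
--         return 1
--     if n == 2:
--         return 2
--     broken = set(a)
--     prev2, prev1 = 1, 2
--     for k in range(3, n + 1):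
--         cur = 0 if k in broken else (prev2 + prev1) % 1000000007
--         prev2, prev1 = prev1, cur
--     return prev1
-- ===== Notes on version B (the rewrite author's own statement) =====
-- stated objective: alternative
-- what changed: replaces the exponential naive recursion (whose memo dict is written but never read) with a bottom-up two-variable DP over 3..n using a set of broken stairs
-- outside the precondition, e.g. on starsFib(0, [0]): A returns 0, B returns 2
import Mathlib
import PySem

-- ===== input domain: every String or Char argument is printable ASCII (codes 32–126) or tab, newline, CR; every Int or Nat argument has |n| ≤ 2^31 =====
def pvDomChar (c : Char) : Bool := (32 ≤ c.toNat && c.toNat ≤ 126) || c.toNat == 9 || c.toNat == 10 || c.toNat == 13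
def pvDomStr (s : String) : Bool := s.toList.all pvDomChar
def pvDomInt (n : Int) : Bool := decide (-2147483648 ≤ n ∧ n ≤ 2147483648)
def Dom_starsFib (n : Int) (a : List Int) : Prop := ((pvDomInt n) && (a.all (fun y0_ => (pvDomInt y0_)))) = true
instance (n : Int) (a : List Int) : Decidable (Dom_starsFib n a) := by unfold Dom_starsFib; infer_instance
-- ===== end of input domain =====

-- B replaces A's exponential naive recursion (its memo is written but never read) with a
-- bottom-up two-variable DP over 3..n (intended as faster; a timing run could not confirm it).
-- NOTE: A also mutates the module-level dict 'memo'; only the return value is claimed here.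

-- ===== PORT A =====
-- Literal port of A's recursion; the 'n ≤ 2' guard only totalises the cases where the
-- Python recursion never terminates (excluded by Pre_), it is reached on no admitted input.
def starsFib (n : Int) (a : List Int) : Int :=
  if n = 1 then 1
  else if n = 2 then 2
  else if n ∈ a then 0
  else if n ≤ 2 then 0
  else (starsFib (n - 1) a + starsFib (n - 2) a) % 1000000007
termination_by n.toNat
decreasing_by all_goals omega

-- ===== PORT B =====
def starsFib_alt (n : Int) (a : List Int) : Int :=
  if n = 1 then 1
  else if n = 2 then 2
  else
    let broken : PySem.Set Int := PySem.Set.ofList a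
    let s := (PySem.List.pyRange 3 (n + 1) 1).foldl
      (fun (s : Int × Int) (k : Int) =>
        (s.2, if PySem.Set.contains broken k then 0 else (s.1 + s.2) % 1000000007))
      (1, 2)
    s.2

-- ===== PRECONDITION & SPEC =====
-- Pre_ excludes n ≤ 0, where A's recursion does not terminate except when the membership
-- shortcut happens to fire (e.g. n itself a broken stair, an accidental 0 below the stairs).
def Pre_starsFib (n : Int) (a : List Int) : Prop := 1 ≤ n
instance (n : Int) (a : List Int) : Decidable (Pre_starsFib n a) := by unfold Pre_starsFib; infer_instance
def pvWitness_starsFib : Int × List Int := (7, [4, 6])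

def Spec_starsFib (n : Int) (a : List Int) (out : Int) : Prop := out = starsFib_alt n a
instance (n : Int) (a : List Int) (out : Int) : Decidable (Spec_starsFib n a out) := by unfold Spec_starsFib; infer_instance

-- ===== CLAIM (what is proved, stated in full; the proofs are below) =====
def Claim_equal_starsFib : Prop := ∀ (n : Int) (a : List Int), Dom_starsFib n a → Pre_starsFib n a → Spec_starsFib n a (starsFib n a)

-- ===== LEMMAS AND PROOFS =====

-- After consuming range(3, j+3), B's state pair is (A at j+1, A at j+2).
lemma starsFib_loop_inv (a : List Int) (j : Nat) :
    (PySem.List.pyRange 3 ((j : Int) + 3) 1).foldl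
      (fun (s : Int × Int) (k : Int) =>
        (s.2, if PySem.Set.contains (PySem.Set.ofList a) k then 0 else (s.1 + s.2) % 1000000007))
      (1, 2)
    = (starsFib ((j : Int) + 1) a, starsFib ((j : Int) + 2) a) := by
  induction j with
  | zero =>
    rw [PySem.List.pyRange_one_eq_nil (by norm_num)]
    simp [starsFib]
  | succ j ih =>
    have h3 : (((j + 1 : Nat) : Int) + 3) = ((j : Int) + 3) + 1 := by push_cast; ring
    rw [h3, PySem.List.pyRange_one_succ_right (by omega), List.foldl_append, ih]
    simp only [List.foldl_cons, List.foldl_nil]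
    have c1 : (((j + 1 : Nat) : Int)) + 1 = (j : Int) + 2 := by push_cast; ring
    have c2 : (((j + 1 : Nat) : Int)) + 2 = (j : Int) + 3 := by push_cast; ring
    rw [c1, c2]
    congr 1
    · conv_rhs => rw [starsFib]
      have h1 : ¬ ((j : Int) + 3 = 1) := by omega
      have h2 : ¬ ((j : Int) + 3 = 2) := by omega
      have hle : ¬ ((j : Int) + 3 ≤ 2) := by omega
      by_cases hmem : ((j : Int) + 3) ∈ a
      · simp [h1, h2, hmem, PySem.Set.mem_ofList]
      · have hc : PySem.Set.contains (PySem.Set.ofList a) ((j : Int) + 3) = false := by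
          simp [PySem.Set.mem_ofList, hmem]
        simp only [if_neg h1, if_neg h2, if_neg hmem, if_neg hle, hc, Bool.false_eq_true,
          if_false]
      -- ⊢ remaining goals about argument order / casts
        have e1 : ((j : Int) + 3 - 1) = (j : Int) + 2 := by ring
        have e2 : ((j : Int) + 3 - 2) = (j : Int) + 1 := by ring
        rw [e1, e2, Int.add_comm (starsFib ((j : Int) + 2) a)]

-- ===== VERDICT (by name: the statement is the Claim_ definition above) =====
theorem starsFib_spec : Claim_equal_starsFib := by
  intro n a _ hpre
  unfold Spec_starsFib starsFib_alt
  by_cases h1 : n = 1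
  · subst h1; simp [starsFib]
  by_cases h2 : n = 2
  · subst h2; simp [starsFib]
  · have hn3 : 3 ≤ n := by unfold Pre_starsFib at hpre; omega
    have hj : n = ((n - 2).toNat : Int) + 2 := by omega
    simp only [if_neg h1, if_neg h2]
    have := starsFib_loop_inv a ((n - 2).toNat)
    rw [show ((((n - 2).toNat : Int)) + 3) = n + 1 by omega] at this
    rw [this]
    conv_lhs => rw [hj]
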